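-- pv_equiv track=rewrite | github.com/ClickHouse/clickhouse-docs | scripts/translate/translate.py | replace_code_blocks_with_custom_placeholders
-- ===== SOURCE A (Python) =====
-- import textwrap
--
-- def replace_code_blocks_with_custom_placeholders(markdown_text):
--     lines = markdown_text.split('\n')
--     result_lines = []
--     code_blocks = []
--
--     in_code_block = False
--     current_block = {
--         'language': '',
--         'content': []
--     }
--
--     for line in lines:
--         stripped_line = line.strip()
--
--         if stripped_line.startswith('```') and not in_code_block:
--             # Start of a code block
--             in_code_block = True
--             language_part = stripped_line[3:].strip()  # Remove ``` and whitespace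
--             current_block = {
--                 'language': language_part,
--                 'content': []
--             }
--         elif stripped_line == '```' and in_code_block:
--             # End of a code block
--             in_code_block = False
--
--             # Remove common leading whitespace from code content
--             content_lines = current_block['content']
--             if content_lines:
--                 # Use textwrap.dedent to remove common leading whitespace
--                 dedented_content = textwrap.dedent('\n'.join(content_lines))
--             else:
--                 dedented_content = ''
--
--             code_blocks.append({
--                 'language': current_block['language'],
--                 'content': dedented_content
--             })
--             result_lines.append(f"<CODEBLOCK_{len(code_blocks)}>")
--         elif in_code_block:
--             # Inside a code block - preserve original line (with indentation)
--             current_block['content'].append(line)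
--         else:
--             # Outside a code block - preserve original line
--             result_lines.append(line)
--
--     return '\n'.join(result_lines), code_blocks
-- ===== SOURCE B (Python) =====
-- import textwrap
--
-- def replace_code_blocks_with_custom_placeholders(markdown_text):
--     lines = markdown_text.split('\n')
--     result_lines = []
--     code_blocks = []
--     i = 0
--     n = len(lines)
--     while i < n:
--         line = lines[i]
--         stripped = line.strip()
--         if stripped.startswith('```'):
--             language = stripped[3:].strip()
--             buf = []
--             i += 1
--             while i < n and lines[i].strip() != '```':
--                 buf.append(lines[i])
--                 i += 1
--             if i < n:  # closing fence found
--                 content = textwrap.dedent('\n'.join(buf)) if buf else ''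
--                 code_blocks.append({'language': language, 'content': content})
--                 result_lines.append(f"<CODEBLOCK_{len(code_blocks)}>")
--                 i += 1
--             # else: unterminated block at end of input -> dropped, no placeholder
--         else:
--             result_lines.append(line)
--             i += 1
--     return '\n'.join(result_lines), code_blocks
-- ===== Notes on version B (the rewrite author's own statement) =====
-- stated objective: alternative
-- what changed: Replaces the in_code_block flag automaton (one fold carrying a 5-part mutable state) by a recursive scanner that, upon an opening fence, consumes the whole block with an inner takeWhile/dropWhile scan up to the closing fence and continues after it, dropping an unterminated trailing block directly.
import Mathlib
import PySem

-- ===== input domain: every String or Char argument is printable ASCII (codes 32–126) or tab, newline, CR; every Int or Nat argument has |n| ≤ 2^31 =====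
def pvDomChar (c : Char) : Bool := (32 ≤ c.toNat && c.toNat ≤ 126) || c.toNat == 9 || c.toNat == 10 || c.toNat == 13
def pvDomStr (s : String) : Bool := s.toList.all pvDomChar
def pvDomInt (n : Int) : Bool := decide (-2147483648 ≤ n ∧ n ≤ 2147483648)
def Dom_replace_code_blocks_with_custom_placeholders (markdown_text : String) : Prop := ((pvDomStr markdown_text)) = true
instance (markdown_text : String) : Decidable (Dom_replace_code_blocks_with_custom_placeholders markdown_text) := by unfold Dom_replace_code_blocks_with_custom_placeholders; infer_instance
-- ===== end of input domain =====

-- B replaces A's in_code_block flag automaton by an index-style scanner: a recursive pass that,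
-- on an opening fence, collects the whole block with an inner scan (takeWhile/dropWhile) before
-- continuing after the closing fence; objective: alternative decomposition, same behaviour.


-- ===== PORT A =====
-- shared library helper: textwrap.dedent (CPython 3.11), step for step, exact on '\n'-separated text
def pvWs (c : Char) : Bool := c == ' ' || c == '\t'

-- margin[:i] at the first mismatch (the inner for/zip/break of textwrap.dedent)
def pvCommon : List Char → List Char → List Char
  | x :: ms, y :: is => if x = y then x :: pvCommon ms is else []
  | _, _ => []

def pvDedent (text : List Char) : List Char :=
  -- text = _whitespace_only_re.sub('', text)
  let lines := (PySem.Chars.splitOn text ['\n']).map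
    (fun l => if !l.isEmpty && l.all pvWs then [] else l)
  -- indents = _leading_whitespace_re.findall(text)
  let indents := (lines.filter (fun l => !l.isEmpty)).map (fun l => l.takeWhile pvWs)
  let margin := indents.foldl
    (fun m i => match m with
      | none => some i
      | some m =>
        if m.isPrefixOf i then some m
        else if i.isPrefixOf m then some i
        else some (pvCommon m i)) none
  -- if margin: text = re.sub(r'(?m)^' + margin, '', text)
  match margin with
  | some (c :: m) =>
      PySem.Chars.join ['\n']
        (lines.map (fun l => if (c :: m).isPrefixOf l then l.drop (c :: m).length else l))
  | _ => PySem.Chars.join ['\n'] lines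

def pvBT : List Char := ['`', '`', '`']

def pvPH (n : Nat) : List Char :=
  "<CODEBLOCK_".toList ++ (PySem.Int.toStr (n : Int)).toList ++ ">".toList

def pvDict (lang ded : List Char) : List (String × String) :=
  [("language", String.mk lang), ("content", String.mk ded)]

-- state: (result_lines, code_blocks, in_code_block, current language, current content)
def PvState : Type :=
  List (List Char) × List (List (String × String)) × Bool × List Char × List (List Char)

def pvStepA : PvState → List Char → PvState
  | (res, blocks, inb, lang, cur), line =>
    let s := PySem.Chars.strip line
    if PySem.Chars.startswith s pvBT && !inb then
      (res, blocks, true, PySem.Chars.strip (PySem.List.slice s (some 3) none), [])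
    else if (s == pvBT) && inb then
      let ded := if cur.isEmpty then [] else pvDedent (PySem.Chars.join ['\n'] cur)
      let blocks' := blocks ++ [pvDict lang ded]
      (res ++ [pvPH blocks'.length], blocks', false, lang, cur)
    else if inb then
      (res, blocks, inb, lang, cur ++ [line])
    else
      (res ++ [line], blocks, inb, lang, cur)

def replace_code_blocks_with_custom_placeholders (markdown_text : String) :
    String × (List (List (String × String))) :=
  let lines := PySem.Chars.splitOn markdown_text.toList ['\n']
  let fin := lines.foldl pvStepA ([], [], false, [], [])
  (String.mk (PySem.Chars.join ['\n'] fin.1), fin.2.1)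

-- ===== PORT B =====
def pvNotClose (x : List Char) : Bool := !(PySem.Chars.strip x == pvBT)

def pvScan (blocks : List (List (String × String))) (lines : List (List Char)) :
    List (List Char) × List (List (String × String)) :=
  match lines with
  | [] => ([], blocks)
  | line :: rest =>
    let s := PySem.Chars.strip line
    if PySem.Chars.startswith s pvBT then
      let lang := PySem.Chars.strip (PySem.List.slice s (some 3) none)
      let buf := rest.takeWhile pvNotClose
      match h : rest.dropWhile pvNotClose with
      | [] => ([], blocks)          -- unterminated block at end of input: dropped
      | _ :: rest' =>
        let ded := if buf.isEmpty then [] else pvDedent (PySem.Chars.join ['\n'] buf)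
        let blocks' := blocks ++ [pvDict lang ded]
        let (rs, bs) := pvScan blocks' rest'
        (pvPH blocks'.length :: rs, bs)
    else
      let (rs, bs) := pvScan blocks rest
      (line :: rs, bs)
termination_by lines.length
decreasing_by
  · have h1 : (rest.dropWhile pvNotClose).length ≤ rest.length := rest.length_dropWhile_le pvNotClose
    rw [h] at h1
    simp at h1 ⊢
    omega
  · simp

def replace_code_blocks_with_custom_placeholders_alt (markdown_text : String) :
    String × (List (List (String × String))) :=
  let lines := PySem.Chars.splitOn markdown_text.toList ['\n']
  let (rs, bs) := pvScan [] lines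
  (String.mk (PySem.Chars.join ['\n'] rs), bs)

-- ===== PRECONDITION & SPEC =====
def Spec_replace_code_blocks_with_custom_placeholders (markdown_text : String) (out : String × (List (List (String × String)))) : Prop := out = replace_code_blocks_with_custom_placeholders_alt markdown_text
instance (markdown_text : String) (out : String × (List (List (String × String)))) : Decidable (Spec_replace_code_blocks_with_custom_placeholders markdown_text out) := by unfold Spec_replace_code_blocks_with_custom_placeholders; infer_instance

-- ===== CLAIM (what is proved, stated in full; the proofs are below) =====
def Claim_equal_replace_code_blocks_with_custom_placeholders : Prop := ∀ (markdown_text : String), Dom_replace_code_blocks_with_custom_placeholders markdown_text → Spec_replace_code_blocks_with_custom_placeholders markdown_text (replace_code_blocks_with_custom_placeholders markdown_text)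

-- ===== LEMMAS AND PROOFS =====
-- the block dict built from an opening line and the collected buffer
def pvBlk (line : List Char) (buf : List (List Char)) : List (String × String) :=
  pvDict (PySem.Chars.strip (PySem.List.slice (PySem.Chars.strip line) (some 3) none))
    (if buf.isEmpty then [] else pvDedent (PySem.Chars.join ['\n'] buf))

theorem pvScan_nil (blocks : List (List (String × String))) : pvScan blocks [] = ([], blocks) := by
  simp [pvScan]

theorem pvScan_plain (blocks : List (List (String × String))) (line : List Char)
    (rest : List (List Char)) (hs : PySem.Chars.startswith (PySem.Chars.strip line) pvBT = false) :
    pvScan blocks (line :: rest) = (line :: (pvScan blocks rest).1, (pvScan blocks rest).2) := by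
  conv_lhs => rw [pvScan.eq_def]
  simp [hs]

theorem pvScan_unterm (blocks : List (List (String × String))) (line : List Char)
    (rest : List (List Char)) (hs : PySem.Chars.startswith (PySem.Chars.strip line) pvBT = true)
    (hdw : rest.dropWhile pvNotClose = []) :
    pvScan blocks (line :: rest) = ([], blocks) := by
  conv_lhs => rw [pvScan.eq_def]
  simp only [hs, if_true]
  split
  · rfl
  · rename_i heq
    rw [hdw] at heq
    cases heq

theorem pvScan_closed (blocks : List (List (String × String))) (line : List Char)
    (rest : List (List Char)) (c : List Char) (rest' : List (List Char))
    (hs : PySem.Chars.startswith (PySem.Chars.strip line) pvBT = true)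
    (hdw : rest.dropWhile pvNotClose = c :: rest') :
    pvScan blocks (line :: rest) =
      (pvPH (blocks ++ [pvBlk line (rest.takeWhile pvNotClose)]).length ::
         (pvScan (blocks ++ [pvBlk line (rest.takeWhile pvNotClose)]) rest').1,
       (pvScan (blocks ++ [pvBlk line (rest.takeWhile pvNotClose)]) rest').2) := by
  conv_lhs => rw [pvScan.eq_def]
  simp only [hs, if_true]
  split
  · rename_i heq
    rw [hdw] at heq
    cases heq
  · rename_i x xs heq
    rw [hdw] at heq
    injection heq with h1 h2
    subst h1; subst h2
    simp [pvBlk]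

-- A's fold while in_code_block = true: it swallows lines up to the closing fence
theorem pv_foldA_inb (ls : List (List Char)) :
    ∀ (res : List (List Char)) (blocks : List (List (String × String)))
      (lang : List Char) (cur : List (List Char)),
    ls.foldl pvStepA (res, blocks, true, lang, cur) =
      (match ls.dropWhile pvNotClose with
       | [] => (res, blocks, true, lang, cur ++ ls.takeWhile pvNotClose)
       | _ :: rest =>
         let buf := cur ++ ls.takeWhile pvNotClose
         let ded := if buf.isEmpty then [] else pvDedent (PySem.Chars.join ['\n'] buf)
         let blocks' := blocks ++ [pvDict lang ded]
         rest.foldl pvStepA (res ++ [pvPH blocks'.length], blocks', false, lang, buf)) := by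
  induction ls with
  | nil => intro res blocks lang cur; simp
  | cons h t ih =>
    intro res blocks lang cur
    by_cases hc : PySem.Chars.strip h == pvBT
    · have hEq : PySem.Chars.strip h = pvBT := by simpa using hc
      have hcl : pvNotClose h = false := by simp [pvNotClose, hc]
      have hstep : pvStepA (res, blocks, true, lang, cur) h =
          (res ++ [pvPH (blocks ++
              [pvDict lang (if cur.isEmpty then [] else pvDedent (PySem.Chars.join ['\n'] cur))]).length],
           blocks ++ [pvDict lang (if cur.isEmpty then [] else pvDedent (PySem.Chars.join ['\n'] cur))],
           false, lang, cur) := by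
        simp [pvStepA, hEq]
      simp only [List.foldl_cons, hstep, List.dropWhile_cons, List.takeWhile_cons, hcl]
      simp
    · have hcl : pvNotClose h = true := by simp [pvNotClose, hc]
      have hstep : pvStepA (res, blocks, true, lang, cur) h = (res, blocks, true, lang, cur ++ [h]) := by
        simp [pvStepA, hc]
      simp only [List.foldl_cons, hstep, List.dropWhile_cons, List.takeWhile_cons, hcl, if_true]
      rw [ih]
      simp

-- main invariant: A's fold outside a block computes B's scanner
theorem pv_main (n : Nat) :
    ∀ (ls : List (List Char)), ls.length ≤ n →
    ∀ (res : List (List Char)) (blocks : List (List (String × String)))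
      (lang : List Char) (cur : List (List Char)),
    (ls.foldl pvStepA (res, blocks, false, lang, cur)).1 = res ++ (pvScan blocks ls).1 ∧
    (ls.foldl pvStepA (res, blocks, false, lang, cur)).2.1 = (pvScan blocks ls).2 := by
  induction n with
  | zero =>
    intro ls hls res blocks lang cur
    have : ls = [] := List.length_eq_zero_iff.mp (Nat.le_zero.mp hls)
    subst this; simp [pvScan_nil]
  | succ n ih =>
    intro ls hls res blocks lang cur
    match ls with
    | [] => simp [pvScan_nil]
    | line :: rest =>
      by_cases hs : PySem.Chars.startswith (PySem.Chars.strip line) pvBT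
      · have hstep : pvStepA (res, blocks, false, lang, cur) line =
            (res, blocks, true, PySem.Chars.strip (PySem.List.slice (PySem.Chars.strip line) (some 3) none), []) := by
          simp [pvStepA, hs]
        rw [List.foldl_cons, hstep, pv_foldA_inb]
        cases hdw : rest.dropWhile pvNotClose with
        | nil =>
          rw [pvScan_unterm blocks line rest hs hdw]
          simp
        | cons c rest' =>
          have hlen : rest'.length ≤ n := by
            have h1 : (rest.dropWhile pvNotClose).length ≤ rest.length := rest.length_dropWhile_le pvNotClose
            rw [hdw] at h1
            simp at h1 hls
            omega
          rw [pvScan_closed blocks line rest c rest' hs hdw]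
          simp only [List.nil_append]
          have := ih rest' hlen
            (res ++ [pvPH (blocks ++ [pvBlk line (rest.takeWhile pvNotClose)]).length])
            (blocks ++ [pvBlk line (rest.takeWhile pvNotClose)])
            (PySem.Chars.strip (PySem.List.slice (PySem.Chars.strip line) (some 3) none))
            (rest.takeWhile pvNotClose)
          constructor
          · rw [show (blocks ++ [pvBlk line (rest.takeWhile pvNotClose)] : List (List (String × String))) =
                blocks ++ [pvDict (PySem.Chars.strip (PySem.List.slice (PySem.Chars.strip line) (some 3) none))
                  (if (rest.takeWhile pvNotClose).isEmpty then []
                   else pvDedent (PySem.Chars.join ['\n'] (rest.takeWhile pvNotClose)))] from by simp [pvBlk]] at this ⊢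
            rw [this.1]
            simp
          · rw [show (blocks ++ [pvBlk line (rest.takeWhile pvNotClose)] : List (List (String × String))) =
                blocks ++ [pvDict (PySem.Chars.strip (PySem.List.slice (PySem.Chars.strip line) (some 3) none))
                  (if (rest.takeWhile pvNotClose).isEmpty then []
                   else pvDedent (PySem.Chars.join ['\n'] (rest.takeWhile pvNotClose)))] from by simp [pvBlk]] at this ⊢
            rw [this.2]
      · have hstep : pvStepA (res, blocks, false, lang, cur) line = (res ++ [line], blocks, false, lang, cur) := by
          by_cases hc : PySem.Chars.strip line == pvBT
          · exfalso
            apply hs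
            have hEq : PySem.Chars.strip line = pvBT := by simpa using hc
            rw [hEq]
            rfl
          · simp [pvStepA, hs, hc]
        rw [List.foldl_cons, hstep]
        have hlen : rest.length ≤ n := by simp at hls; omega
        have := ih rest hlen (res ++ [line]) blocks lang cur
        rw [pvScan_plain blocks line rest (by simpa using hs)]
        constructor
        · rw [this.1]; simp
        · rw [this.2]

-- ===== VERDICT (by name: the statement is the Claim_ definition above) =====
theorem replace_code_blocks_with_custom_placeholders_spec : Claim_equal_replace_code_blocks_with_custom_placeholders := by
  intro markdown_text _
  unfold Spec_replace_code_blocks_with_custom_placeholders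
  unfold replace_code_blocks_with_custom_placeholders replace_code_blocks_with_custom_placeholders_alt
  have h := pv_main (PySem.Chars.splitOn markdown_text.toList ['\n']).length
    (PySem.Chars.splitOn markdown_text.toList ['\n']) le_rfl [] [] [] []
  simp only [List.nil_append] at h
  simp only []
  rw [h.1, h.2]
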